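-- pv_equiv track=rewrite | github.com/mbakeranalecta/sam | samsparser.py | parse_insert
-- ===== SOURCE A (Python) =====
-- def parse_insert(insert_string):
--     attributes_list = insert_string.split()
--     insert_type = attributes_list.pop(0)
--     insert_url = attributes_list.pop(0)
--     insert_id = [x[1:] for x in attributes_list if x[0] == '#']
--     insert_condition = [x[1:] for x in attributes_list if x[0] == '?']
--     unexpected_attributes = [x for x in attributes_list if not(x[0] in '?#')]
--     if unexpected_attributes:
--         raise Exception("Unexpected insert attribute(s): {0}".format(unexpected_attributes))
--     return insert_type, \
--            insert_url, \
--            insert_id if insert_id else None, \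
--            insert_condition if insert_condition else None
-- ===== SOURCE B (Python) =====
-- def parse_insert(insert_string):
--     attributes_list = insert_string.split()
--     insert_type = attributes_list.pop(0)
--     insert_url = attributes_list.pop(0)
--     # group the remaining tokens into a dict keyed by their leading character
--     buckets = {}
--     for x in attributes_list:
--         buckets[x[0]] = buckets.get(x[0], []) + [x[1:]]
--     unexpected_attributes = [k + t for k, tails in buckets.items()
--                              if k not in '?#' for t in tails]
--     if unexpected_attributes:
--         raise Exception("Unexpected insert attribute(s): {0}".format(unexpected_attributes))
--     insert_id = buckets.get('#', [])
--     insert_condition = buckets.get('?', [])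
--     return insert_type, insert_url, insert_id or None, insert_condition or None
-- ===== Notes on version B (the rewrite author's own statement) =====
-- stated objective: alternative
-- what changed: Replaces A's three independent filtered scans of the attribute list with one grouping pass that builds a dict keyed by each token's leading character, after which the '#' and '?' results are plain dictionary lookups.
import Mathlib
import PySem

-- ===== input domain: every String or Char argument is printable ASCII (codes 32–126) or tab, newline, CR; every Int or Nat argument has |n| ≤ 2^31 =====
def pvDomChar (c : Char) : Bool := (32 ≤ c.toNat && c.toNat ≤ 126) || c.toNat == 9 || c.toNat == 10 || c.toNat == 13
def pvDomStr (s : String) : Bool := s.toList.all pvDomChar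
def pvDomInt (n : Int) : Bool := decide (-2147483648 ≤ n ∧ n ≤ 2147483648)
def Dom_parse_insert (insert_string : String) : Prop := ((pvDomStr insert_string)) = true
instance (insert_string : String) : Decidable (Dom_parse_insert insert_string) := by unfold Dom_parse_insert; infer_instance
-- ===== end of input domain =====

-- B replaces A's three filtered scans with one grouping pass into a dict keyed by each
-- token's leading character, then looks the answers up (objective: alternative).

-- ===== PORT A =====
-- A: split, pop two, then THREE comprehensions over the remaining tokens; the raise on
-- unexpected attributes (and the IndexError of the pops on < 2 tokens) is excluded by Pre_.
def parse_insert (insert_string : String) : String × String × Option (List String) × Option (List String) :=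
  let attributes_list := PySem.Str.split₀ insert_string
  match attributes_list with
  | insert_type :: insert_url :: rest =>
    let insert_id := (rest.filter (fun x => PySem.Str.pyGet? x 0 == some '#')).map
        (fun x => PySem.Str.slice x (some 1) none)
    let insert_condition := (rest.filter (fun x => PySem.Str.pyGet? x 0 == some '?')).map
        (fun x => PySem.Str.slice x (some 1) none)
    -- x[0] in '?#' ported as the two equalities (split tokens are nonempty, so x[0] is a char)
    let unexpected_attributes := rest.filter
        (fun x => !(PySem.Str.pyGet? x 0 == some '?' || PySem.Str.pyGet? x 0 == some '#'))
    -- 'if unexpected_attributes: raise' — Pre_ makes unexpected_attributes empty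
    match unexpected_attributes with
    | _ => (insert_type, insert_url,
            (if insert_id.isEmpty then none else some insert_id),
            (if insert_condition.isEmpty then none else some insert_condition))
  | _ => ("", "", none, none)   -- pop(0) raises IndexError here; excluded by Pre_

-- ===== PORT B =====
-- B: split, pop two, then ONE grouping pass building a dict keyed by the leading
-- character, then two lookups.
-- loop body of B's grouping pass: buckets[x[0]] = buckets.get(x[0], []) + [x[1:]]
def pvBucketStep (d : PySem.Dict Char (List String)) (x : String) : PySem.Dict Char (List String) :=
  match PySem.Str.pyGet? x 0 with   -- x[0]; split tokens are nonempty, so never raises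
  | some k => d.modify k [] (· ++ [PySem.Str.slice x (some 1) none])
  | none => d

def parse_insert_alt (insert_string : String) : String × String × Option (List String) × Option (List String) :=
  let attributes_list := PySem.Str.split₀ insert_string
  match attributes_list with
  | [] => ("", "", none, none)     -- pop(0) raises IndexError here; excluded by Pre_
  | [_] => ("", "", none, none)    -- pop(0) raises IndexError here; excluded by Pre_
  | insert_type :: insert_url :: rest =>
    let buckets : PySem.Dict Char (List String) := rest.foldl pvBucketStep PySem.Dict.empty
    -- the 'unexpected_attributes' comprehension and raise — Pre_ makes it empty
    let insert_id := buckets.getD '#' []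
    let insert_condition := buckets.getD '?' []
    (insert_type, insert_url,
     (if insert_id.isEmpty then none else some insert_id),
     (if insert_condition.isEmpty then none else some insert_condition))

-- ===== PRECONDITION & SPEC =====
-- Pre_ excludes exactly the inputs where A raises: fewer than two whitespace-separated
-- tokens (IndexError from pop(0)), or a remaining token not starting with '#' or '?'
-- (the explicit Exception).
def Pre_parse_insert (insert_string : String) : Prop :=
  2 ≤ (PySem.Str.split₀ insert_string).length ∧
  ∀ x ∈ (PySem.Str.split₀ insert_string).drop 2,
    PySem.Str.pyGet? x 0 = some '#' ∨ PySem.Str.pyGet? x 0 = some '?'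
instance (insert_string : String) : Decidable (Pre_parse_insert insert_string) := by
  unfold Pre_parse_insert; infer_instance

def pvWitness_parse_insert : String := "image http://x.org/a.png #fig1 ?draft"

def Spec_parse_insert (insert_string : String) (out : String × String × Option (List String) × Option (List String)) : Prop := out = parse_insert_alt insert_string
instance (insert_string : String) (out : String × String × Option (List String) × Option (List String)) : Decidable (Spec_parse_insert insert_string out) := by unfold Spec_parse_insert; infer_instance

-- ===== CLAIM =====
def Claim_equal_parse_insert : Prop := ∀ (insert_string : String), Dom_parse_insert insert_string → Pre_parse_insert insert_string → Spec_parse_insert insert_string (parse_insert insert_string)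

-- ===== LEMMAS AND PROOFS =====

-- B's grouping loop: the bucket of key c holds exactly the tails of the tokens whose
-- first character is c, in order — i.e. A's filtered-and-mapped list for that key.
lemma pv_bucket_eq (rest : List String) (d : PySem.Dict Char (List String)) (c : Char) :
    (rest.foldl pvBucketStep d).getD c []
    = d.getD c [] ++ (rest.filter (fun x => PySem.List.pyGet? x.toList 0 == some c)).map
        (fun x => PySem.Str.slice x (some 1) none) := by
  induction rest generalizing d with
  | nil => simp
  | cons x xs ih =>
    rw [List.foldl_cons]
    cases hx : PySem.List.pyGet? x.toList 0 with
    | none => simp [pvBucketStep, PySem.Str.pyGet?, hx, ih]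
    | some k =>
      by_cases hk : k = c
      · subst hk
        simp [pvBucketStep, PySem.Str.pyGet?, hx, ih, PySem.Dict.getD_modify_self]
      · simp [pvBucketStep, PySem.Str.pyGet?, hx, ih, PySem.Dict.getD_modify, hk]
        exact fun h => absurd h.symm hk

-- ===== VERDICT =====
theorem parse_insert_spec : Claim_equal_parse_insert := by
  intro s _ _
  unfold Spec_parse_insert parse_insert parse_insert_alt
  cases hl : PySem.Str.split₀ s with
  | nil => rfl
  | cons t rest' =>
    cases rest' with
    | nil => rfl
    | cons u rest =>
      simp only [pv_bucket_eq]
      simp
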